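-- pv_equiv track=rewrite | github.com/hugoalmx/questoesccalgoritimos | Trabalho/MT1.PY | mt_apenas_a
-- ===== SOURCE A (Python) =====
-- def mt_apenas_a(fita):
--     # Convertendo a fita para lista de caracteres
--     fita = list(fita)
--
--     # Inicializando as cabeças
--     head_esquerda = 0
--     head_direita = len(fita) - 1
--
--     # Inicializando o estado
--     estado = "q0"  # Estado inicial
--
--     while estado != "q_accept" and estado != "q_reject":
--         # Lendo o símbolo na posição da cabeça esquerda
--         simbolo = fita[head_esquerda] if head_esquerda < len(fita) else " "  # Se estiver fora da fita, considera "espaço"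
--
--         if estado == "q0":
--             if simbolo == "a":  # Se o símbolo for 'a', move para a próxima posição
--                 head_esquerda += 1
--             elif simbolo == " ":  # Se o símbolo for espaço, significa que a fita terminou corretamente
--                 estado = "q_accept"  # Aceita a entrada
--             else:  # Se encontrar um símbolo diferente de 'a'
--                 estado = "q_reject"  # Rejeita a entrada
--
--     return estado == "q_accept"  # Retorna se o estado final foi "q_accept"
-- ===== SOURCE B (Python) =====
-- def mt_apenas_a(fita):
--     rest = fita.lstrip('a')
--     return rest == '' or rest[0] == ' '
-- ===== Notes on version B (the rewrite author's own statement) =====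
-- stated objective: simpler
-- what changed: Replaces the explicit Turing-machine state loop (state variable, head index, per-character while) with one bulk lstrip that removes the leading run of the accepted letter, then a single check that the first remaining character is absent or a space.
import Mathlib
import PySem

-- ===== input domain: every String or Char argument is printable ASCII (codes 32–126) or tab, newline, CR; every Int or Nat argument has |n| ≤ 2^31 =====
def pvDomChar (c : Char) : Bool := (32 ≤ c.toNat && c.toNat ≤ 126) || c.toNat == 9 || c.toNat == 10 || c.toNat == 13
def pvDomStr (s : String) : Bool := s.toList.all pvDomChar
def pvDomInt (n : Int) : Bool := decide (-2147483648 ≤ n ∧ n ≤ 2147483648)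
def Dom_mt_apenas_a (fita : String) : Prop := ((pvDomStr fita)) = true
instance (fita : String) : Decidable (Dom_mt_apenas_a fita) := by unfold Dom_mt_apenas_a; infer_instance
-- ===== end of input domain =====

-- B replaces A's per-character state-machine loop with a bulk lstrip('a') plus one check of the first remaining character (objective: simpler).
-- ===== PORT A =====
-- while loop of A: head scans right; 'a' advances, space (or off-tape) accepts, anything else rejects
def mtLoopA (cs : List Char) (head : Nat) : Bool :=
  let simbolo := (cs[head]?).getD ' '   -- fita[head_esquerda] if in range else " "
  if h : simbolo = 'a' then mtLoopA cs (head + 1)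
  else if simbolo = ' ' then true       -- estado = "q_accept"
  else false                            -- estado = "q_reject"
termination_by cs.length - head
decreasing_by
  rcases Nat.lt_or_ge head cs.length with hlt | hle
  · omega
  · exfalso; simp [simbolo, List.getElem?_eq_none hle] at h

def mt_apenas_a (fita : String) : Bool :=
  mtLoopA fita.toList 0

-- ===== PORT B =====
def mt_apenas_a_alt (fita : String) : Bool :=
  -- fita.lstrip('a'): ported by hand as dropWhile on the char list, exact for the single strip-char 'a'
  let rest := fita.toList.dropWhile (fun c => c == 'a')
  match rest with
  | [] => true
  | c :: _ => c == ' ' 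

-- ===== PRECONDITION & SPEC =====
def Spec_mt_apenas_a (fita : String) (out : Bool) : Prop := out = mt_apenas_a_alt fita
instance (fita : String) (out : Bool) : Decidable (Spec_mt_apenas_a fita out) := by unfold Spec_mt_apenas_a; infer_instance

-- ===== CLAIM (what is proved, stated in full; the proofs are below) =====
def Claim_equal_mt_apenas_a : Prop := ∀ (fita : String), Dom_mt_apenas_a fita → Spec_mt_apenas_a fita (mt_apenas_a fita)

-- ===== LEMMAS AND PROOFS =====

lemma mtLoopA_eq (cs : List Char) (head : Nat) :
    mtLoopA cs head =
      (match (cs.drop head).dropWhile (fun c => c == 'a') with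
       | [] => true
       | c :: _ => c == ' ') := by
  rw [mtLoopA]
  by_cases hlt : head < cs.length
  · have hd : cs.drop head = cs[head] :: cs.drop (head + 1) :=
      List.drop_eq_getElem_cons hlt
    rw [hd]
    by_cases ha : cs[head] = 'a'
    · rw [mtLoopA_eq cs (head + 1)]
      simp [List.getElem?_eq_getElem hlt, ha]
    · simp [List.getElem?_eq_getElem hlt, ha]
      rw [hd, List.dropWhile_cons, if_neg (by simp [ha])]
      cases h : (cs[head] == ' ') <;> simp_all
  · have hle : cs.length ≤ head := by omega
    simp [List.getElem?_eq_none hle, List.drop_eq_nil_of_le hle]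
termination_by cs.length - head
decreasing_by omega

-- ===== VERDICT (by name: the statement is the Claim_ definition above) =====
theorem mt_apenas_a_spec : Claim_equal_mt_apenas_a := by
  intro fita _
  show mt_apenas_a fita = mt_apenas_a_alt fita
  rw [mt_apenas_a, mt_apenas_a_alt, mtLoopA_eq]
  simp
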